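-- pv_equiv track=rewrite | github.com/Tikava/rtm-project | app/core/ai_engine.py | attach_small_components
-- ===== SOURCE A (Python) =====
-- from typing import Dict, List, Any
-- from collections import defaultdict
--
-- def attach_small_components(components: List[List[str]], schema: Dict[str, Any], usage_map: Dict[tuple, int], min_size: int = 2) -> List[List[str]]:
--     """
--     Приклеивает слишком маленькие домены (размер < min_size) к соседям с наибольшим весом связи.
--     """
--     if not components:
--         return components
--     rels = schema.get("relations", [])
--     # индексация по таблицам
--     comp_index = {}
--     for idx, comp in enumerate(components):
--         for t in comp:
--             comp_index[t] = idx
--     weights = defaultdict(lambda: defaultdict(int))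
--     for r in rels:
--         a, b = r.get("from"), r.get("to")
--         if a in comp_index and b in comp_index:
--             ia, ib = comp_index[a], comp_index[b]
--             if ia == ib:
--                 continue
--             w = usage_map.get(tuple(sorted((a, b))), 1)
--             weights[ia][ib] += w
--             weights[ib][ia] += w
--     small = []
--     large = []
--     large_map = {}
--     for idx, comp in enumerate(components):
--         if len(comp) < min_size:
--             small.append((idx, comp))
--         else:
--             large_map[idx] = len(large)
--             large.append(comp)
--     if not large:
--         return components
--     for orig_idx, comp in small:
--         if not comp:
--             continue
--         candidates = weights.get(orig_idx, {})
--         target_large_idx = None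
--         if candidates:
--             best = sorted(candidates.items(), key=lambda x: x[1], reverse=True)
--             for tgt, _ in best:
--                 if tgt in large_map:
--                     target_large_idx = large_map[tgt]
--                     break
--         if target_large_idx is None:
--             target_large_idx = 0
--         large[target_large_idx].extend(comp)
--     # финальная очистка
--     merged = []
--     for comp in large:
--         if comp:
--             merged.append(sorted(list(set(comp))))
--     return merged
-- ===== SOURCE B (Python) =====
-- from collections import defaultdict
--
-- def attach_small_components(components, schema, usage_map, min_size=2):
--     # B: same index/weight build as A, but: list-comprehension partition, a single
--     # strict-max pass over candidates instead of sort+scan, copies instead of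
--     # mutating the caller's sublists, and a comprehension for the final cleanup.
--     if not components:
--         return components
--     comp_index = {t: idx for idx, comp in enumerate(components) for t in comp}
--     weights = defaultdict(lambda: defaultdict(int))
--     for r in schema.get("relations", []):
--         a, b = r.get("from"), r.get("to")
--         if a in comp_index and b in comp_index:
--             ia, ib = comp_index[a], comp_index[b]
--             if ia == ib:
--                 continue
--             w = usage_map.get(tuple(sorted((a, b))), 1)
--             weights[ia][ib] += w
--             weights[ib][ia] += w
--     small = [(idx, comp) for idx, comp in enumerate(components) if len(comp) < min_size]
--     large = [list(comp) for comp in components if len(comp) >= min_size]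
--     large_map = {}
--     for idx, comp in enumerate(components):
--         if len(comp) >= min_size:
--             large_map[idx] = len(large_map)
--     if not large:
--         return components
--     for orig_idx, comp in small:
--         if not comp:
--             continue
--         best_w = None
--         target = 0
--         for tgt, w in weights.get(orig_idx, {}).items():
--             if tgt in large_map and (best_w is None or w > best_w):
--                 best_w = w
--                 target = large_map[tgt]
--         large[target] += comp
--     return [sorted(set(comp)) for comp in large if comp]
-- ===== Notes on version B (the rewrite author's own statement) =====
-- stated objective: simpler
-- what changed: B replaces A's sort-all-candidates-then-scan selection with a single strict-max pass over the candidate dict (first-seen maximum wins, matching A's stable descending sort tie-break), builds small/large/large_map with comprehensions instead of A's one triple-accumulator loop, works on copies instead of mutating the caller's sublists, and emits the final cleanup as a filter+map comprehension.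
import Mathlib
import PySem

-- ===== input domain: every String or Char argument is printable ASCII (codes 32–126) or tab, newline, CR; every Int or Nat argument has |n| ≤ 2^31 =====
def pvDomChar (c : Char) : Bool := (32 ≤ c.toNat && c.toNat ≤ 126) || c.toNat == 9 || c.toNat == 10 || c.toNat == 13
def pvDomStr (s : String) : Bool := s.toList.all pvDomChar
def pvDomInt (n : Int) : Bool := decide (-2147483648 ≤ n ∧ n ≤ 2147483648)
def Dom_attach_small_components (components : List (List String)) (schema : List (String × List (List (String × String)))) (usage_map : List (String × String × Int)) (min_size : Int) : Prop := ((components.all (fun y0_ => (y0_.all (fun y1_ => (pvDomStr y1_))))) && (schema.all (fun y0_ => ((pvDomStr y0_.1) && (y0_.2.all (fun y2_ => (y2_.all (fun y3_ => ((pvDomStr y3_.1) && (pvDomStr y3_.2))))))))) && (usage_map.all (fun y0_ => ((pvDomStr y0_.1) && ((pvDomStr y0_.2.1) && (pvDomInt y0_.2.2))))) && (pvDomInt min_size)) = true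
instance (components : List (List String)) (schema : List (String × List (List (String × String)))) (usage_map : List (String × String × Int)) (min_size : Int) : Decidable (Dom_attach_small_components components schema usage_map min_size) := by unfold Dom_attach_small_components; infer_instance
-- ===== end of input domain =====

-- B keeps A's index/weight build but selects the merge target by one strict-max pass instead of
-- sort-then-scan and uses comprehension-style partition/cleanup; equivalence is about the RETURN
-- value only: Python A mutates the large component sublists in place (extend), B works on copies.

-- ===== PORT A =====
-- shared helpers: this code is textually identical in Source A and Source B
-- r.get(k) on a relation dict
def pvGetStr (r : List (String × String)) (k : String) : Option String :=
  (List.find? (fun q => q.1 == k) r).map (·.2)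

-- comp_index: table -> component index (dict built over enumerate(components))
def pvCompIndex (components : List (List String)) : PySem.Dict String Int :=
  (PySem.List.enumerate components).foldl
    (fun d p => p.2.foldl (fun d t => d.insert t p.1) d) PySem.Dict.empty

-- usage_map.get(tuple(sorted((a, b))), 1)
def pvUsage (usage_map : List (String × String × Int)) (a b : String) : Int :=
  let key := if a ≤ b then (a, b) else (b, a)
  ((List.find? (fun q => q.1 == key.1 && q.2.1 == key.2) usage_map).map (·.2.2)).getD 1

-- the weight-accumulation loop over schema.get("relations", [])
def pvWeights (components : List (List String)) (schema : List (String × List (List (String × String)))) (usage_map : List (String × String × Int)) : PySem.Dict Int (PySem.Dict Int Int) :=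
  let rels := ((List.find? (fun q => q.1 == "relations") schema).map (·.2)).getD []
  let ci := pvCompIndex components
  rels.foldl (fun w r =>
    match pvGetStr r "from", pvGetStr r "to" with
    | some a, some b =>
      match ci.get? a, ci.get? b with
      | some ia, some ib =>
        if ia == ib then w
        else
          let v := pvUsage usage_map a b
          let w1 := w.insert ia ((w.getD ia PySem.Dict.empty).insert ib
                      ((w.getD ia PySem.Dict.empty).getD ib 0 + v))
          w1.insert ib ((w1.getD ib PySem.Dict.empty).insert ia
                      ((w1.getD ib PySem.Dict.empty).getD ia 0 + v))
      | _, _ => w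
    | _, _ => w) PySem.Dict.empty

-- A-side helpers
-- A's single loop building small / large / large_map together
def pvAPartStep (min_size : Int) (acc : List (Int × List String) × List (List String) × PySem.Dict Int Nat) (p : Int × List String) : List (Int × List String) × List (List String) × PySem.Dict Int Nat :=
  if (p.2.length : Int) < min_size then (acc.1 ++ [p], acc.2.1, acc.2.2)
  else (acc.1, acc.2.1 ++ [p.2], acc.2.2.insert p.1 acc.2.1.length)

def pvA_partition (components : List (List String)) (min_size : Int) : List (Int × List String) × List (List String) × PySem.Dict Int Nat :=
  (PySem.List.enumerate components).foldl (pvAPartStep min_size) ([], [], PySem.Dict.empty)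

-- A: sort candidates by weight descending (stable), scan for the first large target, default 0
def pvA_pick (weights : PySem.Dict Int (PySem.Dict Int Int)) (large_map : PySem.Dict Int Nat) (idx : Int) : Nat :=
  (((PySem.List.sorted (weights.getD idx PySem.Dict.empty).items (fun q => q.2) true).find?
      (fun q => large_map.contains q.1)).bind (fun q => large_map.get? q.1)).getD 0

-- A's merge loop (large[t].extend(comp))
def pvA_merge (weights : PySem.Dict Int (PySem.Dict Int Int)) (large_map : PySem.Dict Int Nat) (small : List (Int × List String)) (large : List (List String)) : List (List String) :=
  small.foldl (fun large p =>
    if p.2 = [] then large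
    else large.set (pvA_pick weights large_map p.1)
           (large.getD (pvA_pick weights large_map p.1) [] ++ p.2)) large

-- A's final loop: merged.append(sorted(list(set(comp)))) for nonempty comp
def pvA_clean (large : List (List String)) : List (List String) :=
  large.foldl (fun acc comp =>
    if comp ≠ [] then acc ++ [PySem.List.sorted (PySem.Set.ofList comp) (fun x => x) false]
    else acc) []

def attach_small_components (components : List (List String)) (schema : List (String × List (List (String × String)))) (usage_map : List (String × String × Int)) (min_size : Int) : List (List String) :=
  if components = [] then components
  else
    let weights := pvWeights components schema usage_map
    let plt := pvA_partition components min_size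
    if plt.2.1 = [] then components
    else pvA_clean (pvA_merge weights plt.2.2 plt.1 plt.2.1)

-- ===== PORT B =====
-- B-side helpers
-- B's large_map loop: large_map[idx] = len(large_map)
def pvBMapStep (min_size : Int) (m : PySem.Dict Int Nat) (p : Int × List String) : PySem.Dict Int Nat :=
  if min_size ≤ (p.2.length : Int) then m.insert p.1 m.size else m

-- B's inner loop body: track highest-weight large neighbour, strict '>' so first max wins
def pvBStep (large_map : PySem.Dict Int Nat) (acc : Option Int × Nat) (q : Int × Int) : Option Int × Nat :=
  match large_map.get? q.1 with
  | some li =>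
    match acc.1 with
    | none => (some q.2, li)
    | some bw => if bw < q.2 then (some q.2, li) else acc
  | none => acc

def pvB_pick (weights : PySem.Dict Int (PySem.Dict Int Int)) (large_map : PySem.Dict Int Nat) (idx : Int) : Option Int × Nat :=
  (weights.getD idx PySem.Dict.empty).items.foldl (pvBStep large_map) (none, 0)

def pvB_merge (weights : PySem.Dict Int (PySem.Dict Int Int)) (large_map : PySem.Dict Int Nat) (small : List (Int × List String)) (large : List (List String)) : List (List String) :=
  small.foldl (fun large p =>
    if p.2 = [] then large
    else large.set (pvB_pick weights large_map p.1).2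
           (large.getD (pvB_pick weights large_map p.1).2 [] ++ p.2)) large

-- B's final comprehension
def pvB_clean (large : List (List String)) : List (List String) :=
  (large.filter (fun c => !c.isEmpty)).map
    (fun comp => PySem.List.sorted (PySem.Set.ofList comp) (fun x => x) false)

def attach_small_components_alt (components : List (List String)) (schema : List (String × List (List (String × String)))) (usage_map : List (String × String × Int)) (min_size : Int) : List (List String) :=
  if components = [] then components
  else
    let weights := pvWeights components schema usage_map
    let small := (PySem.List.enumerate components).filter (fun p => decide ((p.2.length : Int) < min_size))
    let large0 := components.filter (fun c => decide (min_size ≤ (c.length : Int)))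
    let large_map := (PySem.List.enumerate components).foldl (pvBMapStep min_size) PySem.Dict.empty
    if large0 = [] then components
    else pvB_clean (pvB_merge weights large_map small large0)

-- ===== PRECONDITION & SPEC =====
def Spec_attach_small_components (components : List (List String)) (schema : List (String × List (List (String × String)))) (usage_map : List (String × String × Int)) (min_size : Int) (out : List (List String)) : Prop := out = attach_small_components_alt components schema usage_map min_size
instance (components : List (List String)) (schema : List (String × List (List (String × String)))) (usage_map : List (String × String × Int)) (min_size : Int) (out : List (List String)) : Decidable (Spec_attach_small_components components schema usage_map min_size out) := by unfold Spec_attach_small_components; infer_instance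

-- ===== CLAIM (what is proved, stated in full; the proofs are below) =====
def Claim_equal_attach_small_components : Prop := ∀ (components : List (List String)) (schema : List (String × List (List (String × String)))) (usage_map : List (String × String × Int)) (min_size : Int), Dom_attach_small_components components schema usage_map min_size → Spec_attach_small_components components schema usage_map min_size (attach_small_components components schema usage_map min_size)

-- ===== LEMMAS AND PROOFS =====

-- the abstract "first element with strictly maximal weight among large candidates" combiner
def pvCombine (large_map : PySem.Dict Int Nat) (r : Option (Int × Int)) (x : Int × Int) : Option (Int × Int) :=
  if large_map.contains x.1 then
    match r with
    | none => some x
    | some m => if m.2 < x.2 then some x else some m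
  else r

def pvConv (large_map : PySem.Dict Int Nat) (r : Option (Int × Int)) : Option Int × Nat :=
  match r with
  | none => (none, 0)
  | some m => (some m.2, (large_map.get? m.1).getD 0)

lemma pv_find_insertBy (large_map : PySem.Dict Int Nat) (x : Int × Int) :
    ∀ (s : List (Int × Int)), s.Pairwise (fun a b => b.2 ≤ a.2) →
      (PySem.List.insertBy (fun a b : Int × Int => decide (b.2 < a.2)) x s).find?
          (fun q => large_map.contains q.1)
        = pvCombine large_map (s.find? (fun q => large_map.contains q.1)) x := by
  intro s
  induction s with
  | nil =>
    intro _
    by_cases hx : large_map.contains x.1 = true <;>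
      simp [PySem.List.insertBy, pvCombine, List.find?, hx]
  | cons y ys ih =>
    intro hp
    have hhead : ∀ m ∈ ys, m.2 ≤ y.2 := (List.pairwise_cons.mp hp).1
    have htail : ys.Pairwise (fun a b : Int × Int => b.2 ≤ a.2) := (List.pairwise_cons.mp hp).2
    by_cases hlt : y.2 < x.2
    · -- x is inserted before y
      have : PySem.List.insertBy (fun a b : Int × Int => decide (b.2 < a.2)) x (y :: ys)
          = x :: y :: ys := by simp [PySem.List.insertBy, hlt]
      rw [this]
      by_cases hx : large_map.contains x.1 = true
      · -- any match in y :: ys has weight ≤ y.2 < x.2, so combine picks x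
        rw [List.find?_cons_of_pos (p := fun q : Int × Int => large_map.contains q.1) hx]
        cases hfind : List.find? (fun q => large_map.contains q.1) (y :: ys) with
        | none => simp [pvCombine, hx]
        | some m =>
          have hm : m ∈ y :: ys := List.mem_of_find?_eq_some hfind
          have hmw : m.2 ≤ y.2 := by
            rcases List.mem_cons.mp hm with h | h
            · exact le_of_eq (by rw [h])
            · exact hhead m h
          have hmx : m.2 < x.2 := lt_of_le_of_lt hmw hlt
          simp [pvCombine, hx, hmx]
      · rw [List.find?_cons_of_neg (p := fun q : Int × Int => large_map.contains q.1) hx]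
        simp [pvCombine, hx]
    · -- x is inserted somewhere inside ys, after y
      have : PySem.List.insertBy (fun a b : Int × Int => decide (b.2 < a.2)) x (y :: ys)
          = y :: PySem.List.insertBy (fun a b : Int × Int => decide (b.2 < a.2)) x ys := by
        simp [PySem.List.insertBy, hlt]
      rw [this]
      by_cases hy : large_map.contains y.1 = true
      · -- y is found first on both sides; combine cannot replace y since ¬ y.2 < x.2
        rw [List.find?_cons_of_pos (p := fun q : Int × Int => large_map.contains q.1) hy,
          List.find?_cons_of_pos (p := fun q : Int × Int => large_map.contains q.1) hy]
        by_cases hx : large_map.contains x.1 = true <;> simp [pvCombine, hx, hlt]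
      · rw [List.find?_cons_of_neg (p := fun q : Int × Int => large_map.contains q.1) hy,
          List.find?_cons_of_neg (p := fun q : Int × Int => large_map.contains q.1) hy]
        exact ih htail

lemma pv_sorted_rev_snoc (l₁ : List (Int × Int)) (x : Int × Int) :
    PySem.List.sorted (l₁ ++ [x]) (fun q => q.2) true
      = PySem.List.insertBy (fun a b : Int × Int => decide (b.2 < a.2)) x
          (PySem.List.sorted l₁ (fun q => q.2) true) := by
  rw [PySem.List.sorted_rev_eq_foldl_insertBy, PySem.List.sorted_rev_eq_foldl_insertBy,
    List.foldl_append]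
  rfl

lemma pv_find_sorted_aux (large_map : PySem.Dict Int Nat) :
    ∀ (l l₁ : List (Int × Int)),
      (PySem.List.sorted (l₁ ++ l) (fun q => q.2) true).find? (fun q => large_map.contains q.1)
        = l.foldl (pvCombine large_map)
            ((PySem.List.sorted l₁ (fun q => q.2) true).find? (fun q => large_map.contains q.1)) := by
  intro l
  induction l with
  | nil => intro l₁; simp
  | cons x l ih =>
    intro l₁
    have h1 : l₁ ++ x :: l = (l₁ ++ [x]) ++ l := by simp
    rw [h1, ih (l₁ ++ [x]), pv_sorted_rev_snoc,
      pv_find_insertBy large_map x _ (PySem.List.sorted_pairwise_rev l₁ (fun q => q.2))]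
    rfl

lemma pv_find_sorted (large_map : PySem.Dict Int Nat) (l : List (Int × Int)) :
    (PySem.List.sorted l (fun q => q.2) true).find? (fun q => large_map.contains q.1)
      = l.foldl (pvCombine large_map) none := by
  have h := pv_find_sorted_aux large_map l []
  simpa using h

lemma pv_foldl_bstep (large_map : PySem.Dict Int Nat) :
    ∀ (l : List (Int × Int)) (r : Option (Int × Int)),
      (∀ m, r = some m → (large_map.get? m.1).isSome = true) →
      l.foldl (pvBStep large_map) (pvConv large_map r)
        = pvConv large_map (l.foldl (pvCombine large_map) r) := by
  intro l
  induction l with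
  | nil => intro r _; rfl
  | cons q l ih =>
    intro r hr
    simp only [List.foldl_cons]
    cases hq : large_map.get? q.1 with
    | none =>
      have hc : large_map.contains q.1 = false := by
        rw [PySem.Dict.contains_eq_isSome_get?, hq]; rfl
      have h1 : pvBStep large_map (pvConv large_map r) q = pvConv large_map r := by
        simp [pvBStep, hq]
      have h2 : pvCombine large_map r q = r := by simp [pvCombine, hc]
      rw [h1, h2]; exact ih r hr
    | some li =>
      have hc : large_map.contains q.1 = true := by
        rw [PySem.Dict.contains_eq_isSome_get?, hq]; rfl
      cases r with
      | none =>
        have h1 : pvBStep large_map (pvConv large_map none) q = pvConv large_map (some q) := by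
          simp [pvBStep, pvConv, hq]
        have h2 : pvCombine large_map none q = some q := by simp [pvCombine, hc]
        rw [h1, h2]
        exact ih (some q) (by intro m hm; cases hm; simp [hq])
      | some m =>
        have hm := hr m rfl
        by_cases hw : m.2 < q.2
        · have h1 : pvBStep large_map (pvConv large_map (some m)) q
              = pvConv large_map (some q) := by
            simp [pvBStep, pvConv, hq, hw]
          have h2 : pvCombine large_map (some m) q = some q := by simp [pvCombine, hc, hw]
          rw [h1, h2]
          exact ih (some q) (by intro m' hm'; cases hm'; simp [hq])
        · have h1 : pvBStep large_map (pvConv large_map (some m)) q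
              = pvConv large_map (some m) := by
            simp [pvBStep, pvConv, hq, hw]
          have h2 : pvCombine large_map (some m) q = some m := by simp [pvCombine, hc, hw]
          rw [h1, h2]
          exact ih (some m) hr

lemma pv_pick_eq (weights : PySem.Dict Int (PySem.Dict Int Int)) (large_map : PySem.Dict Int Nat) (idx : Int) :
    pvA_pick weights large_map idx = (pvB_pick weights large_map idx).2 := by
  unfold pvA_pick pvB_pick
  rw [pv_find_sorted]
  rw [show ((none, 0) : Option Int × Nat) = pvConv large_map none from rfl,
    pv_foldl_bstep large_map _ none (by intro m hm; cases hm)]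
  cases hres : (weights.getD idx PySem.Dict.empty).items.foldl (pvCombine large_map) none with
  | none => rfl
  | some m => simp [pvConv, Option.getD]

lemma pv_merge_eq (weights : PySem.Dict Int (PySem.Dict Int Int)) (large_map : PySem.Dict Int Nat) (small : List (Int × List String)) (large : List (List String)) :
    pvA_merge weights large_map small large = pvB_merge weights large_map small large := by
  simp only [pvA_merge, pvB_merge, pv_pick_eq]

lemma pv_partition_go (min_size : Int) :
    ∀ (es : List (Int × List String)) (s0 : List (Int × List String)) (l0 : List (List String)) (m0 : PySem.Dict Int Nat),
      m0.size = l0.length → (∀ p ∈ es, m0.contains p.1 = false) → (es.map (·.1)).Nodup →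
      es.foldl (pvAPartStep min_size) (s0, l0, m0) =
        (s0 ++ es.filter (fun p => decide ((p.2.length : Int) < min_size)),
         l0 ++ (es.filter (fun p => decide (min_size ≤ (p.2.length : Int)))).map (·.2),
         es.foldl (pvBMapStep min_size) m0) := by
  intro es
  induction es with
  | nil => intro s0 l0 m0 _ _ _; simp
  | cons p es ih =>
    intro s0 l0 m0 hsz hfresh hnd
    rw [List.map_cons] at hnd
    have hndt : (es.map (·.1)).Nodup := (List.nodup_cons.mp hnd).2
    have hne : ∀ q ∈ es, q.1 ≠ p.1 := by
      intro q hq heq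
      exact (List.nodup_cons.mp hnd).1 (by rw [← heq]; exact List.mem_map_of_mem hq)
    by_cases h : (p.2.length : Int) < min_size
    · have h2 : ¬ min_size ≤ (p.2.length : Int) := by omega
      simp only [List.foldl_cons, pvAPartStep, pvBMapStep, if_pos h, if_neg h2]
      rw [ih (s0 ++ [p]) l0 m0 hsz (fun q hq => hfresh q (List.mem_cons_of_mem p hq)) hndt]
      simp [h, h2]
    · have h2 : min_size ≤ (p.2.length : Int) := by omega
      simp only [List.foldl_cons, pvAPartStep, pvBMapStep, if_neg h, if_pos h2]
      have hfp : m0.contains p.1 = false := hfresh p List.mem_cons_self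
      have hsz' : (m0.insert p.1 l0.length).size = (l0 ++ [p.2]).length := by
        rw [PySem.Dict.size_insert, hfp]
        simp [hsz]
      have hfresh' : ∀ q ∈ es, (m0.insert p.1 l0.length).contains q.1 = false := by
        intro q hq
        rw [PySem.Dict.contains_insert]
        simp [hne q hq, hfresh q (List.mem_cons_of_mem p hq)]
      rw [show m0.insert p.1 m0.size = m0.insert p.1 l0.length from by rw [hsz]]
      rw [ih s0 (l0 ++ [p.2]) (m0.insert p.1 l0.length) hsz' hfresh' hndt]
      simp [h, h2]

lemma pv_filter_snd_enumerate (pred : List String → Bool) :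
    ∀ (xs : List (List String)) (s : Int),
      ((PySem.List.enumerate xs s).filter (fun p => pred p.2)).map (·.2) = xs.filter pred := by
  intro xs
  induction xs with
  | nil => intro s; rfl
  | cons x xs ih =>
    intro s
    rw [PySem.List.enumerate_cons]
    by_cases h : pred x = true <;> simp [h, ih (s + 1)]

lemma pv_partition_spec (components : List (List String)) (min_size : Int) :
    pvA_partition components min_size =
      ((PySem.List.enumerate components).filter (fun p => decide ((p.2.length : Int) < min_size)),
       components.filter (fun c => decide (min_size ≤ (c.length : Int))),
       (PySem.List.enumerate components).foldl (pvBMapStep min_size) PySem.Dict.empty) := by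
  unfold pvA_partition
  rw [pv_partition_go min_size (PySem.List.enumerate components) [] [] PySem.Dict.empty
    (by simp [PySem.Dict.size_empty])
    (fun p _ => PySem.Dict.contains_empty p.1)
    (by
      have h : ((PySem.List.enumerate components).map (·.1)) =
          PySem.List.pyRange 0 (0 + (components.length : Int)) := by
        simpa using PySem.List.map_fst_enumerate components 0
      rw [h]
      exact PySem.List.nodup_pyRange_one 0 (0 + (components.length : Int)))]
  rw [pv_filter_snd_enumerate (fun c => decide (min_size ≤ (c.length : Int))) components 0]
  simp

lemma pv_clean_eq (l : List (List String)) : pvA_clean l = pvB_clean l := by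
  unfold pvA_clean pvB_clean
  have hg : (fun (acc : List (List String)) comp =>
        if comp ≠ [] then acc ++ [PySem.List.sorted (PySem.Set.ofList comp) (fun x => x) false]
        else acc)
      = (fun (acc : List (List String)) comp =>
        if (!comp.isEmpty) = true then
          acc ++ [PySem.List.sorted (PySem.Set.ofList comp) (fun x => x) false]
        else acc) := by
    funext acc comp
    cases comp <;> simp
  rw [hg, PySem.List.foldl_append_if]
  simp

lemma pv_ports_agree (components : List (List String)) (schema : List (String × List (List (String × String)))) (usage_map : List (String × String × Int)) (min_size : Int) :
    attach_small_components components schema usage_map min_size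
      = attach_small_components_alt components schema usage_map min_size := by
  by_cases hc : components = []
  · simp [attach_small_components, attach_small_components_alt, hc]
  · simp only [attach_small_components, attach_small_components_alt, if_neg hc]
    rw [pv_partition_spec]
    by_cases hl : components.filter (fun c => decide (min_size ≤ (c.length : Int))) = []
    · simp [hl]
    · simp only [hl, ite_false]
      rw [pv_merge_eq, pv_clean_eq]

-- ===== VERDICT (by name: the statement is the Claim_ definition above) =====
theorem attach_small_components_spec : Claim_equal_attach_small_components := by
  intro components schema usage_map min_size _
  unfold Spec_attach_small_components
  exact pv_ports_agree components schema usage_map min_size
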